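/- GENERATED by mk_final_copies.py from the proof of the farm's unit `start_decoder.R16` (farm:start_decoder.R16.2: Lemmas.lean) as the
   re-elaboration sweep compiled it — do not edit. -/
import Asan.CheckWalk
import Vorbis.Spec.StartDecoderMid
import Vorbis.Spec.Units.start_decoder_R16

open X86 X86.User Asan Vorbis Vorbis.Spec Vorbis.Spec.StartDecoder

set_option maxRecDepth 4000
set_option maxHeartbeats 4000000

namespace Vorbis.Spec.start_decoder_R16

/-! ### 1. The transient of the channel loop as a predicate on the memory, and what a step may write -/

/-- **The clauses of `ChanLoop` that are not in `SecPt`**, for the memory `m`: channel `i` is being built (`i < channels`),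
`previous_length = 0`, and the buffers of the channels below `n` (`n = i` inside the iteration, `n = i + 1` at its end) are
blocks of `Blk` (`Since A9 A.1` for the ghost of the moment). -/
structure Tr (g : Ghost) (i n : Nat) (Blk : Block → Prop) (m : Mem) : Prop where
  /-- the loop test of R15 -/
  lt : (i : Int) < stb_vorbis.channels m g.f
  /-- M7 -/
  prev0 : stb_vorbis.previous_length m g.f = 0
  /-- M6 below `n` -/
  chan : Mdct.ChanUpTo Blk m g.f n
  /-- FY1 below `n` -/
  fy : FYUpTo Blk m g.f (m.i32 (g.R + 0x28)) n

/-- **A window that `Tr g i n` does not read**: it misses `channels`, `blocksize_1`, the three pointer arrays below `n`,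
`previous_length` and the slot of `longest_floorlist`. -/
def TrWin (g : Ghost) (n : Nat) (w : Span) : Prop :=
  (w.hi ≤ g.f ∨ g.f + 8 ≤ w.lo) ∧ (w.hi ≤ g.f + 156 ∨ g.f + 160 ≤ w.lo) ∧
  (w.hi ≤ g.f + 872 ∨ g.f + 872 + 8 * n ≤ w.lo) ∧ (w.hi ≤ g.f + 1128 ∨ g.f + 1128 + 8 * n ≤ w.lo) ∧
  (w.hi ≤ g.f + 1256 ∨ g.f + 1264 + 8 * n ≤ w.lo) ∧ (w.hi ≤ g.R + 0x28 ∨ g.R + 0x2c ≤ w.lo)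

/-- **`Tr` over a footprint** whose windows are all `TrWin`, into a larger block predicate. -/
theorem Tr.carry {g : Ghost} {i n : Nat} {Blk Blk' : Block → Prop} {m m' : Mem} {ws : List Span}
    (h : Tr g i n Blk m) (hs : Mem.SameExcept ws m m') (hok : ∀ w, w ∈ ws → TrWin g n w)
    (hB : ∀ B, Blk B → Blk' B) (hn : n ≤ 16) (hf : g.f + 1808 ≤ 2 ^ 63) (hR : g.R + 0x2c ≤ 2 ^ 63) :
    Tr g i n Blk' m' := by
  have e_ch : Mem.EqOn g.f (g.f + 8) m m' := by
    apply hs.eqOn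
    intro w hw
    have := hok w hw
    unfold TrWin at this
    omega
  have e_b1 : Mem.EqOn (g.f + 156) (g.f + 160) m m' := by
    apply hs.eqOn
    intro w hw
    have := hok w hw
    unfold TrWin at this
    omega
  have e_cb : Mem.EqOn (g.f + 872) (g.f + 872 + 8 * n) m m' := by
    apply hs.eqOn
    intro w hw
    have := hok w hw
    unfold TrWin at this
    omega
  have e_pw : Mem.EqOn (g.f + 1128) (g.f + 1128 + 8 * n) m m' := by
    apply hs.eqOn
    intro w hw
    have := hok w hw
    unfold TrWin at this
    omega
  have e_fy : Mem.EqOn (g.f + 1256) (g.f + 1264 + 8 * n) m m' := by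
    apply hs.eqOn
    intro w hw
    have := hok w hw
    unfold TrWin at this
    omega
  have e_lf : Mem.EqOn (g.R + 0x28) (g.R + 0x2c) m m' := by
    apply hs.eqOn
    intro w hw
    have := hok w hw
    unfold TrWin at this
    omega
  have hb1 : stb_vorbis.blocksize_1 m' g.f = stb_vorbis.blocksize_1 m g.f := by
    simp only [vacc, voff]
    exact e_b1.i32 _ (by omega) (by omega) (by omega)
  have hcb : ∀ j, j < n → stb_vorbis.channel_buffers m' g.f j = stb_vorbis.channel_buffers m g.f j := by
    intro j hj
    simp only [vacc, voff]
    exact e_cb.u64 _ (by omega) (by omega) (by omega)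
  have hpw : ∀ j, j < n → stb_vorbis.previous_window m' g.f j = stb_vorbis.previous_window m g.f j := by
    intro j hj
    simp only [vacc, voff]
    exact e_pw.u64 _ (by omega) (by omega) (by omega)
  have hfy : ∀ j, j < n → stb_vorbis.finalY m' g.f j = stb_vorbis.finalY m g.f j := by
    intro j hj
    simp only [vacc, voff]
    exact e_fy.u64 _ (by omega) (by omega) (by omega)
  refine ⟨?_, ?_, h.chan.congr hcb hpw hb1 hB, ?_⟩
  · have e : stb_vorbis.channels m' g.f = stb_vorbis.channels m g.f := by
      simp only [vacc, voff]
      exact e_ch.i32 _ (by omega) (by omega) (by omega)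
    rw [e]
    exact h.lt
  · have e : stb_vorbis.previous_length m' g.f = stb_vorbis.previous_length m g.f := by
      simp only [vacc, voff]
      exact e_fy.i32 _ (by omega) (by omega) (by omega)
    rw [e]
    exact h.prev0
  · rw [e_lf.i32 (g.R + 0x28) (by omega) (by omega) (by omega)]
    exact (h.fy.of_eq hfy).reblk (fun c _ hb => hB _ hb)

/-! ### 2. The segment's own stores, and an allocator call -/

/-- **A window the segment itself (or `error`, or memset of a young block) writes**: the stack below the steady rsp (pushed
return addresses, callee frames), the spill slot `[R + 10H, R + 18H)`, `f->error`, the three pointer slots of channel `i`, a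
window inside a block allocated since the snapshot `A9`. -/
def OwnWin (g : Ghost) (i : Nat) (A9 : Arena) (A : Arena × List Obj) (w : Span) : Prop :=
  (g.R - 408 ≤ w.lo ∧ w.hi ≤ g.R) ∨ (g.R + 0x10 ≤ w.lo ∧ w.hi ≤ g.R + 0x18) ∨
  (g.f + 140 ≤ w.lo ∧ w.hi ≤ g.f + 144) ∨
  (g.f + 872 + 8 * i ≤ w.lo ∧ w.hi ≤ g.f + 880 + 8 * i) ∨
  (g.f + 1128 + 8 * i ≤ w.lo ∧ w.hi ≤ g.f + 1136 + 8 * i) ∨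
  (g.f + 1264 + 8 * i ≤ w.lo ∧ w.hi ≤ g.f + 1272 + 8 * i) ∨ Young A9 A w

/-- The frame constants of point 9 (`ONE20`, `Z24`, the shadow index; `Z10` is dead) over a change of memory that leaves
`[R + 8, R + 10H)` and `[R + 20H, R + 28H)` alone: the spill slot `[R + 10H, R + 18H)` may be written. -/
theorem consts_carry {m m' : Mem} {R : Nat} (h : SDFrameConsts 9 m R) (he1 : Mem.EqOn (R + 8) (R + 0x10) m m')
    (he2 : Mem.EqOn (R + 0x20) (R + 0x28) m m') (hR : R + 0x28 ≤ 2 ^ 64) : SDFrameConsts 9 m' R := by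
  obtain ⟨h1, h2, h3, _, h5⟩ := h
  refine ⟨h1, ?_, ?_, ?_, ?_⟩
  · rw [he1.u64 (R + 8) (by omega) (by omega) (by omega)]
    exact h2
  · rw [he2.u32 (R + 0x20) (by omega) (by omega) (by omega)]
    exact h3
  · intro hk
    omega
  · intro hk1 hk2
    rw [he2.u32 (R + 0x24) (by omega) (by omega) (by omega)]
    exact h5 hk1 hk2

/-- **THE STEP OVER THE SEGMENT'S OWN STORES** (and `error`'s / memset's footprints): the memory parts of `Frame`, `Mid g 9 9 10`
and the transient `Tr` over ONE `Mem.SameExcept` whose windows are `OwnWin`, the ghost unchanged, no shadow byte written. -/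
theorem own_step {g : Ghost} {i : Nat} {A9 : Arena} {A : Arena × List Obj} {m m' : Mem} {ws : List Span}
    (hp : Pos g A) (hf : FInv g A m) (hm : Mid g 9 9 10 A9 A m) (ht : Tr g i i (Since A9 A.1) m) (hi : i < 16)
    (hs : Mem.SameExcept ws m m') (hun : ShadowUntouched m m') (hok : ∀ w, w ∈ ws → OwnWin g i A9 A w) :
    FInv g A m' ∧ Mid g 9 9 10 A9 A m' ∧ Tr g i i (Since A9 A.1) m' := by
  have p1 := hp.r_eq
  have p2 := hp.ra_lo
  have p3 := hp.ra_hi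
  have p4 := hp.f_lo
  have p5 := hp.f_hi
  have p6 := hp.f_stack
  have p7 := hp.objOut
  have p9 := hp.ar_lo
  have p10 := hp.ar_hi
  have p11 := hp.ar_stack
  have e1 : Mid.hi 9 = 868 := by decide
  have e2 : restFrom 10 = 1400 := by decide
  have hmw : ∀ w, w ∈ ws → MidWin g 9 10 A9 A w ∨ (g.R + 0x10 ≤ w.lo ∧ w.hi ≤ g.R + 0x28) := by
    intro w hw
    have k := hok w hw
    unfold OwnWin at k
    unfold MidWin
    rw [e1, e2]
    rcases k with k | k | k | k | k | k | k
    · left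
      left
      omega
    · right
      omega
    · left
      right; right; right; right; left
      omega
    · left
      right; right; right; right; right; left
      omega
    · left
      right; right; right; right; right; left
      omega
    · left
      right; right; right; right; right; left
      omega
    · left
      right; right; right; right; right; right; right; right; right
      exact k
  have hbits : Bits (g.Blk A) g.len m' g.f := by
    apply bits_kept hp hm.bits hs
    intro w hw
    have k := hok w hw
    unfold OwnWin Young at k
    omega
  have hconsts : SDFrameConsts 9 m' g.R := by
    apply consts_carry hm.consts _ _ (by omega)
    · apply hs.eqOn
      intro w hw
      have k := hok w hw
      unfold OwnWin Young at k
      omega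
    · apply hs.eqOn
      intro w hw
      have k := hok w hw
      unfold OwnWin Young at k
      omega
  refine ⟨?_, hm.carry_spill hp hs hun hmw hbits hconsts, ?_⟩
  · apply hf.carry hp hs hun
    intro w hw
    have k := hok w hw
    unfold OwnWin Young at k
    unfold SecWin
    omega
  · apply ht.carry hs _ (fun B hB => hB) (by omega) (by omega) (by omega)
    intro w hw
    have k := hok w hw
    unfold OwnWin Young at k
    unfold TrWin
    omega

/-- **A WHOLE `call setup_malloc` OF THE CHANNEL LOOP, both outcomes** (`SecPt.alloc_call` / `SecPt.alloc_fail` + the transient):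
`s` = the state at the callee's entry, `sr` = the returned state. GIVES a ghost `A'` (the old one, or grown by the new block)
with the point and the transient at `sr`, the result (NULL, or a block allocated since `A9`), and what the caller needs to read
its own slots through the call: `[f + 136, f + 1808)` and the own frame `[R, R + 598H)` are unchanged. -/
theorem alloc_step {u₀ : State} {g : Ghost} {pc pc' : Word} {i : Nat} {A9 : Arena} {A : Arena × List Obj} {v s sr : State}
    (hfr : Frame u₀ g pc A v) (hh : g.Hand A) (hp : Pos g A) (hf : FInv g A s.mem) (hm : Mid g 9 9 10 A9 A s.mem)
    (ht : Tr g i i (Since A9 A.1) s.mem) (hi : i < 16)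
    (hsp : (s.reg .rsp).toNat + 8 = g.R) (hrdi : (s.reg .rdi).toNat = g.f)
    (hs : Mem.SameExcept [⟨(s.reg .rsp).toNat - 80, (s.reg .rsp).toNat⟩,
      ⟨(s.reg .rdi).toNat + 8, (s.reg .rdi).toNat + 12⟩, ⟨(s.reg .rdi).toNat + 128, (s.reg .rdi).toNat + 132⟩,
      shadowSpan (A.1.B + A.1.S + 32) (A.1.B + A.1.S + 32 + (s.reg .rsi).toNat % 2 ^ 32)] s.mem sr.mem)
    (hpost : (setup_malloc.spec A.2 g.frames' A.1).post s sr)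
    (hrip : sr.rip = pc') (hrsp : sr.reg .rsp = addr g.R) (hcode : CodeOK u₀ sr.mem) (hinv : abiInv sr)
    (hrbp : sr.reg .rbp = addr g.f) :
    ∃ A' : Arena × List Obj, SecPt u₀ g pc' 9 9 10 A9 A' sr ∧ Tr g i i (Since A9 A'.1) sr.mem ∧ A.1.Extends A'.1 ∧
      (sr.reg .rax = 0 ∨ Since A9 A'.1 ⟨(sr.reg .rax).toNat, (s.reg .rsi).toNat % 2 ^ 32⟩) ∧
      Mem.EqOn (g.f + 136) (g.f + 1808) s.mem sr.mem ∧ Mem.EqOn g.R (g.R + 0x598) s.mem sr.mem := by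
  have p1 := hp.r_eq
  have p2 := hp.ra_lo
  have p3 := hp.ra_hi
  have p4 := hp.f_lo
  have p5 := hp.f_hi
  have p6 := hp.f_stack
  have hspn : (s.reg .rsp).toNat = g.R - 8 := by omega
  by_cases hfit : A.1.Fits ((s.reg .rsi).toNat % 2 ^ 32)
  · -- the block was allocated: the ghost grows
    obtain ⟨hpt', hrax, _, hsince⟩ := SecPt.alloc_call hfr hh hp hf hm hsp hrdi hs hpost hfit hrip hrsp hcode hinv hrbp
    have hshw := shadow_win_of_fits hm.arena hfit
    have hext := A.1.extends_pushSetup ((s.reg .rsi).toNat % 2 ^ 32)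
    refine ⟨_, hpt', ?_, hext, Or.inr ?_, ?_, ?_⟩
    · apply ht.carry hs _ (fun B hB => hB.mono hext) (by omega) (by omega) (by omega)
      intro w hw
      simp only [List.mem_cons, List.mem_nil_iff, or_false] at hw
      unfold TrWin
      rcases hw with rfl | rfl | rfl | rfl
      · simp only []
        omega
      · simp only []
        omega
      · simp only []
        omega
      · omega
    · rw [hrax, Nat.add_assoc]
      exact hsince.older hm.extc
    · apply hs.eqOn
      intro w hw
      simp only [List.mem_cons, List.mem_nil_iff, or_false] at hw
      rcases hw with rfl | rfl | rfl | rfl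
      · simp only []
        omega
      · simp only []
        omega
      · simp only []
        omega
      · omega
    · apply hs.eqOn
      intro w hw
      simp only [List.mem_cons, List.mem_nil_iff, or_false] at hw
      rcases hw with rfl | rfl | rfl | rfl
      · simp only []
        omega
      · simp only []
        omega
      · simp only []
        omega
      · omega
  · -- the request did not fit: NULL, the same ghost
    obtain ⟨hrax, ha', hun, hfail⟩ := hpost.2 hfit
    obtain ⟨hpt', _⟩ := SecPt.alloc_fail hfr hh hp hf hm hsp hrdi ha' hun hfail hrip hrsp hcode hinv hrbp
    refine ⟨A, hpt', ?_, Arena.Extends.refl _, Or.inl hrax, ?_, ?_⟩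
    · apply ht.carry hfail _ (fun B hB => hB) (by omega) (by omega) (by omega)
      intro w hw
      simp only [List.mem_cons, List.mem_nil_iff, or_false] at hw
      unfold TrWin
      rcases hw with rfl | rfl
      · simp only []
        omega
      · simp only []
        omega
    · apply hfail.eqOn
      intro w hw
      simp only [List.mem_cons, List.mem_nil_iff, or_false] at hw
      rcases hw with rfl | rfl
      · simp only []
        omega
      · simp only []
        omega
    · apply hfail.eqOn
      intro w hw
      simp only [List.mem_cons, List.mem_nil_iff, or_false] at hw
      rcases hw with rfl | rfl
      · simp only []
        omega
      · simp only []
        omega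

/-! ### 3. Small arithmetic and read lemmas -/

/-- A signed dword that is a natural number reads as that number. -/
theorem i32_read {m : Mem} {a n : Nat} (h : m.i32 a = (n : Int)) : m.readLE (addr a) 4 = n := by
  rw [Mem.i32_def] at h
  have hlt := Mem.u32_lt m a
  have hc := sint32_cases (m.u32 a)
  have hn : m.u32 a = n := by omega
  unfold Mem.u32 at hn
  exact hn

/-- `lea esi, [rax*4]` on `eax = blocksize_1 ≤ 8192`: the request of the first allocation is `4·b1`. -/
theorem lea4 (b : Nat) (hb : b ≤ 8192) :
    (Word.ofBV (BitVec.setWidth 32 (Word.ofBV (BitVec.ofNat 32 b) * 4).toBitVec)).toNat = 4 * b := by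
  rw [Vorbis.toNat_ofBV32, BitVec.toNat_setWidth, UInt64.toNat_toBitVec, UInt64.toNat_mul, Vorbis.toNat_ofBV32,
    BitVec.toNat_ofNat]
  have e4 : (4 : UInt64).toNat = 4 := rfl
  rw [e4]
  omega

/-! ### 4. The cut assertions inside the segment, and the walks between them -/

/-- **At `cut320` (0x116680, the return of the first `setup_malloc`)**: the point for the ghost of the moment, `r14d = i`,
`r15 = &f->blocksize_1`, the transient, `blocksize_1 = b1`, and rax = NULL or a block of `4·b1` bytes allocated since `A9`. -/
structure CutA (u₀ : State) (g : Ghost) (i b1 : Nat) (A9 : Arena) (A : Arena × List Obj) (s : State) : Prop where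
  pt : SecPt u₀ g Vorbis.L.start_decoder.cut320 9 9 10 A9 A s
  r14 : s.reg .r14 = addr i
  r15 : s.reg .r15 = addr g.f + 156
  tr : Tr g i i (Since A9 A.1) s.mem
  bs : stb_vorbis.blocksize_1 s.mem g.f = (b1 : Int)
  bs_le : b1 ≤ 8192
  res : s.reg .rax = 0 ∨ Since A9 A.1 ⟨(s.reg .rax).toNat, 4 * b1⟩

/-- **R16, piece 1** (0x11665c … 0x11667b, returns into `cut320`): the checked load of `blocksize_1`, `setup_malloc(f, 4·b1)`. -/
theorem seg1 {Lay : Layout} (hLay : Lay.hi = 0x1000000) {μ : Microarch} (hμ : UserX.MicroOK μ) {u₀ : State}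
    (hcode : HasCodeNat Lay u₀ Vorbis.L.start_decoder.entry Vorbis.Code.code_start_decoder.nat Vorbis.L.start_decoder.size)
    (hload4 : Asan.SmallCheck Lay μ Vorbis.WayInv (Vorbis.CodeOK u₀) [.rax, .rcx, .rdx] 4 Vorbis.L.__asan_load4_noabort.entry)
    (h_setup_malloc : ∀ (others : List Obj) (frames : List (Nat × FrameLayout)) (A : Arena),
      Calls Lay μ Vorbis.WayInv (Vorbis.conv u₀) Vorbis.L.setup_malloc.entry (Vorbis.Spec.setup_malloc.spec others frames A))
    {g : Ghost} {i : Nat} {v : State} {A9 : Arena} {A : Arena × List Obj} (hb : BodyR16 u₀ g i A9 A v) :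
    ReachVia Lay μ WayInv v (fun w => ∃ b1 A', CutA u₀ g i b1 A9 A' w) := by
  have hloop := hb.loop
  have hfr := hloop.frame
  have hh := hloop.hand
  have hm := hloop.mid
  have hp : Pos g A := Pos.of_mid hfr hh hm
  have he := hfr.entry
  v_entry he
  obtain ⟨hRa, hR8⟩ := hfr.r_eq
  simp only [steady, Ghost.RA] at hRa
  simp only [depth] at he_room he_stack
  have hflo := hp.f_lo
  have hf2 := hp.f_hi
  have hf3 := hp.f_stack
  simp only [Ghost.RA] at hf3
  have hRn : (addr g.R).toNat = g.R := toNat_addr _ (by omega)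
  have hfn : (addr g.f).toNat = g.f := toNat_addr _ (by omega)
  have w_rip := hfr.rip
  have c_rsp := hfr.rsp
  have c_rbp := hloop.rbp
  have c_r14 := hloop.r14
  have w_eq : Mem.EqOn Vorbis.L.textLo Vorbis.L.textHi u₀.mem v.mem := hfr.code
  have hdf : v.flags .df = false := (show abiInv _ from hfr.inv).1
  have hmx : v.mxcsr &&& 0x1F80 = 0x1F80 := (show abiInv _ from hfr.inv).2
  have hsse := Vorbis.sseOK_of_abiInv hfr.inv
  have hsm := h_setup_malloc A.2 g.frames' A.1
  have hd1 := hm.header.HD1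
  have hlt := hb.lt
  have hi16 : i < 16 := by omega
  -- `blocksize_1` as a number, and as the four bytes the load at 0x11666b reads
  have hd3 := hm.header.HD3.range
  obtain ⟨b1, hb1⟩ : ∃ b1 : Nat, stb_vorbis.blocksize_1 v.mem g.f = (b1 : Int) :=
    ⟨(stb_vorbis.blocksize_1 v.mem g.f).toNat, by omega⟩
  have hb1le : b1 ≤ 8192 := by omega
  have hb1r : v.mem.readLE (addr g.f + 156) 4 = b1 := by
    have hu := hb1
    simp only [vacc, voff] at hu
    rw [addr_add_lit]
    exact i32_read hu
  have htr0 : Tr g i i (Since A9 A.1) v.mem := ⟨hlt, hloop.prev0, hloop.chan, hloop.fy⟩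
  u_walk hcode [hμ.vendor] until [Vorbis.L.start_decoder.cut320] span [Vorbis.L.textLo, Vorbis.L.textHi] side (v_side)
  case check_116666 =>
    -- 0x116666: the load of `f->blocksize_1` (f + 156)
    have hun : ShadowUntouched v.mem s_116666.mem := by v_untouched
    refine (hh.obj.mono (frames'_sub g A.2)).accSmall hfr.shadow hun _ 4 (by decide) (by u_omega) ?_
    simp only [Off.sizeof.stb_vorbis]
    u_omega
  case call_inv => v_inv
  case pre_11667b =>
    -- 0x11667b: `setup_malloc(f, 4·b1)`
    have hun : ShadowUntouched v.mem s_11667b.mem := by v_untouched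
    have hs : Mem.SameExcept [⟨g.R - 8, g.R⟩] v.mem s_11667b.mem := by u_same
    refine ⟨shadowPre_call hfr (by rw [w_rsp]; u_omega) hun, ?_, ?_, hh.arenaText⟩
    · rw [w_rdi, hfn]
      exact (hh.obj.mono (frames'_sub g A.2)).blockLive
    · rw [w_rdi, hfn]
      apply hm.arena.frame (by simp only [Off.sizeof.stb_vorbis]; omega)
      apply hs.eqOn
      intro w hw
      simp only [List.mem_cons, List.mem_nil_iff, or_false] at hw
      rcases hw with rfl
      simp only [voff]
      omega
  -- the returned state (0x116680)
  have hsp : (s_11667b.reg .rsp).toNat + 8 = g.R := by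
    rw [w_rsp_11667b]
    u_omega
  have hrdi : (s_11667b.reg .rdi).toNat = g.f := by
    rw [w_rdi_11667b]
    exact hfn
  have hn : (s_11667b.reg .rsi).toNat % 2 ^ 32 = 4 * b1 := by
    rw [w_rsi_11667b, lea4 b1 hb1le]
    omega
  have hun0 : ShadowUntouched v.mem s_11667b.mem := by v_untouched
  have hs0 : Mem.SameExcept [⟨g.R - 8, g.R⟩] v.mem s_11667b.mem := by u_same
  have hws0 : ∀ w, w ∈ [(⟨g.R - 8, g.R⟩ : Span)] → OwnWin g i A9 A w := by
    intro w hw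
    simp only [List.mem_cons, List.mem_nil_iff, or_false] at hw
    unfold OwnWin
    rcases hw with rfl
    left
    simp only []
    omega
  obtain ⟨hf1, hm1, ht1⟩ := own_step hp (FInv.of hfr) hm htr0 hi16 hs0 hun0 hws0
  have hb1s : stb_vorbis.blocksize_1 s_11667b.mem g.f = (b1 : Int) := by
    rw [← hb1]
    simp only [vacc, voff]
    have e0 : Mem.EqOn (g.f + 156) (g.f + 160) v.mem s_11667b.mem := by
      apply hs0.eqOn
      intro w hw
      simp only [List.mem_cons, List.mem_nil_iff, or_false] at hw
      rcases hw with rfl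
      simp only []
      omega
    exact e0.i32 _ (by omega) (by omega) (by omega)
  have hsame := w_same
  simp only [X86.User.Spec.footprint, vspec] at hsame
  have hcodeOK : CodeOK u₀ s_11667br.mem := Vorbis.conv_code_eqOn w_code
  have hrbp : s_11667br.reg .rbp = addr g.f := by
    rw [w_kept.get .rbp rfl]
    exact c_rbp
  obtain ⟨A', hpt', ht', _, hres, hef, _⟩ :=
    alloc_step hfr hh hp hf1 hm1 ht1 hi16 hsp hrdi hsame w_post w_rip w_rsp hcodeOK w_inv hrbp
  rw [hn] at hres
  refine ReachVia.done ⟨b1, A', hpt', ?_, w_r15, ht', ?_, hb1le, hres⟩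
  · rw [w_kept.get .r14 rfl]
    exact c_r14
  · rw [← hb1s]
    simp only [vacc, voff]
    exact hef.i32 _ (by omega) (by omega) (by omega)

/-- `movsxd rsi, [f->blocksize_1] ; shl rsi, 2 ; shr rsi, 1`: the request of the second allocation is `2·b1`. -/
theorem shl2shr1 (b : Nat) (hb : b ≤ 8192) : (UInt64.ofNat b <<< 2 >>> 1).toNat = 2 * b := by
  have e1 : (1 : UInt64).toNat % 64 = 1 := by decide
  have e2 : (2 : UInt64).toNat % 64 = 2 := by decide
  rw [UInt64.toNat_shiftRight, UInt64.toNat_shiftLeft, UInt64.toNat_ofNat', e1, e2, Nat.shiftLeft_eq, Nat.shiftRight_eq_div_pow]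
  omega

/-- **At `cut321` (0x1166c4, the return of the second `setup_malloc`)**: as `CutA`, with `rbx = i`, `r12 = i + 6CH`,
`r13 = &f->channel_buffers[i]`; `channel_buffers[i]` is stored (NULL or a block of `4·b1` bytes since `A9`); rax = NULL or a
block of `2·b1` bytes allocated since `A9`. -/
structure CutB (u₀ : State) (g : Ghost) (i b1 : Nat) (A9 : Arena) (A : Arena × List Obj) (s : State) : Prop where
  pt : SecPt u₀ g Vorbis.L.start_decoder.cut321 9 9 10 A9 A s
  r14 : s.reg .r14 = addr i
  rbx : s.reg .rbx = UInt64.ofNat i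
  r12 : s.reg .r12 = UInt64.ofNat i + 108
  r13 : s.reg .r13 = addr g.f + UInt64.ofNat i * 8 + 872
  tr : Tr g i i (Since A9 A.1) s.mem
  bs : stb_vorbis.blocksize_1 s.mem g.f = (b1 : Int)
  bs_le : b1 ≤ 8192
  cb : stb_vorbis.channel_buffers s.mem g.f i = 0 ∨ Since A9 A.1 ⟨stb_vorbis.channel_buffers s.mem g.f i, 4 * b1⟩
  res : s.reg .rax = 0 ∨ Since A9 A.1 ⟨(s.reg .rax).toNat, 2 * b1⟩

/-- **R16, piece 2** (`cut320` 0x116680 … 0x1166bf, returns into `cut321`): the spill of the first result, the checked store of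
`channel_buffers[i]`, the checked load of `blocksize_1`, `setup_malloc(f, 2·b1)`. -/
theorem seg2 {Lay : Layout} (hLay : Lay.hi = 0x1000000) {μ : Microarch} (hμ : UserX.MicroOK μ) {u₀ : State}
    (hcode : HasCodeNat Lay u₀ Vorbis.L.start_decoder.entry Vorbis.Code.code_start_decoder.nat Vorbis.L.start_decoder.size)
    (hload4 : Asan.SmallCheck Lay μ Vorbis.WayInv (Vorbis.CodeOK u₀) [.rax, .rcx, .rdx] 4 Vorbis.L.__asan_load4_noabort.entry)
    (hstore8 : Asan.SmallCheck Lay μ Vorbis.WayInv (Vorbis.CodeOK u₀) [.rax, .rcx, .rdx] 8 Vorbis.L.__asan_store8_noabort.entry)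
    (h_setup_malloc : ∀ (others : List Obj) (frames : List (Nat × FrameLayout)) (A : Arena),
      Calls Lay μ Vorbis.WayInv (Vorbis.conv u₀) Vorbis.L.setup_malloc.entry (Vorbis.Spec.setup_malloc.spec others frames A))
    {g : Ghost} {i b1 : Nat} {v : State} {A9 : Arena} {A : Arena × List Obj} (hb : CutA u₀ g i b1 A9 A v) :
    ReachVia Lay μ WayInv v (fun w => ∃ A', CutB u₀ g i b1 A9 A' w) := by
  have hpt := hb.pt
  have hfr := hpt.frame
  have hh := hpt.hand
  have hm := hpt.mid
  have hp : Pos g A := hpt.pos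
  have he := hfr.entry
  v_entry he
  obtain ⟨hRa, hR8⟩ := hfr.r_eq
  simp only [steady, Ghost.RA] at hRa
  simp only [depth] at he_room he_stack
  have hflo := hp.f_lo
  have hf2 := hp.f_hi
  have hf3 := hp.f_stack
  simp only [Ghost.RA] at hf3
  have hRn : (addr g.R).toNat = g.R := toNat_addr _ (by omega)
  have hfn : (addr g.f).toNat = g.f := toNat_addr _ (by omega)
  have w_rip := hfr.rip
  have c_rsp := hfr.rsp
  have c_rbp := hpt.rbp
  have c_r14 : v.reg .r14 = UInt64.ofNat i := hb.r14
  have c_r15 := hb.r15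
  have w_eq : Mem.EqOn Vorbis.L.textLo Vorbis.L.textHi u₀.mem v.mem := hfr.code
  have hdf : v.flags .df = false := (show abiInv _ from hfr.inv).1
  have hmx : v.mxcsr &&& 0x1F80 = 0x1F80 := (show abiInv _ from hfr.inv).2
  have hsse := Vorbis.sseOK_of_abiInv hfr.inv
  have hsm := h_setup_malloc A.2 g.frames' A.1
  have hd1 := hm.header.HD1
  have hlt := hb.tr.lt
  have hi16 : i < 16 := by omega
  have hb1le := hb.bs_le
  have hb1r : v.mem.readLE (addr g.f + 156) 4 = b1 := by
    have hu := hb.bs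
    simp only [vacc, voff] at hu
    rw [addr_add_lit]
    exact i32_read hu
  u_walk hcode [hμ.vendor, cnt32_sext_bv i (by omega), cnt32_part i, cnt32_sext_bv b1 (by omega)] until [Vorbis.L.start_decoder.cut321] span [Vorbis.L.textLo, Vorbis.L.textHi] side (v_side)
  case check_116697 =>
    -- 0x116697: the store of `f->channel_buffers[i]` (f + 872 + 8i)
    have hun : ShadowUntouched v.mem s_116697.mem := by v_untouched
    refine (hh.obj.mono (frames'_sub g A.2)).accSmall hfr.shadow hun _ 8 (by decide) (by u_omega) ?_
    simp only [Off.sizeof.stb_vorbis]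
    u_omega
  case check_1166a9 =>
    -- 0x1166a9: the load of `f->blocksize_1`
    have hun : ShadowUntouched v.mem s_1166a9.mem := by v_untouched
    refine (hh.obj.mono (frames'_sub g A.2)).accSmall hfr.shadow hun _ 4 (by decide) (by u_omega) ?_
    simp only [Off.sizeof.stb_vorbis]
    u_omega
  case call_inv => v_inv
  case pre_1166bf =>
    -- 0x1166bf: `setup_malloc(f, 2·b1)`
    have hun : ShadowUntouched v.mem s_1166bf.mem := by v_untouched
    have hs : Mem.SameExcept [⟨g.R - 8, g.R⟩, ⟨g.R + 16, g.R + 24⟩, ⟨g.f + 872 + 8 * i, g.f + 880 + 8 * i⟩]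
        v.mem s_1166bf.mem := by u_same
    refine ⟨shadowPre_call hfr (by rw [w_rsp]; u_omega) hun, ?_, ?_, hh.arenaText⟩
    · rw [w_rdi, hfn]
      exact (hh.obj.mono (frames'_sub g A.2)).blockLive
    · rw [w_rdi, hfn]
      apply hm.arena.frame (by simp only [Off.sizeof.stb_vorbis]; omega)
      apply hs.eqOn
      intro w hw
      simp only [List.mem_cons, List.mem_nil_iff, or_false] at hw
      rcases hw with rfl | rfl | rfl <;> simp only [voff] <;> omega
  -- the returned state (0x1166c4)
  have hsp : (s_1166bf.reg .rsp).toNat + 8 = g.R := by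
    rw [w_rsp_1166bf]
    u_omega
  have hrdi : (s_1166bf.reg .rdi).toNat = g.f := by
    rw [w_rdi_1166bf]
    exact hfn
  have hn : (s_1166bf.reg .rsi).toNat % 2 ^ 32 = 2 * b1 := by
    rw [w_rsi_1166bf, shl2shr1 b1 hb1le]
    omega
  have hun0 : ShadowUntouched v.mem s_1166bf.mem := by v_untouched
  have hs0 : Mem.SameExcept [⟨g.R - 8, g.R⟩, ⟨g.R + 16, g.R + 24⟩, ⟨g.f + 872 + 8 * i, g.f + 880 + 8 * i⟩]
      v.mem s_1166bf.mem := by u_same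
  have hws0 : ∀ w, w ∈ [(⟨g.R - 8, g.R⟩ : Span), ⟨g.R + 16, g.R + 24⟩, ⟨g.f + 872 + 8 * i, g.f + 880 + 8 * i⟩] →
      OwnWin g i A9 A w := by
    intro w hw
    simp only [List.mem_cons, List.mem_nil_iff, or_false] at hw
    unfold OwnWin
    rcases hw with rfl | rfl | rfl
    · left
      simp only []
      omega
    · right; left
      simp only []
      omega
    · right; right; right; left
      simp only []
      omega
  obtain ⟨hf1, hm1, ht1⟩ := own_step hp (FInv.of hfr) hm hb.tr hi16 hs0 hun0 hws0
  have hb1s : stb_vorbis.blocksize_1 s_1166bf.mem g.f = (b1 : Int) := by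
    rw [← hb.bs]
    simp only [vacc, voff]
    have e0 : Mem.EqOn (g.f + 156) (g.f + 160) v.mem s_1166bf.mem := by
      apply hs0.eqOn
      intro w hw
      simp only [List.mem_cons, List.mem_nil_iff, or_false] at hw
      rcases hw with rfl | rfl | rfl <;> simp only [] <;> omega
    exact e0.i32 _ (by omega) (by omega) (by omega)
  -- `channel_buffers[i]` at the call state: the spilled result
  have ea : addr g.f + (UInt64.ofNat i + 108) * 8 + 8 = addr (g.f + 872 + 8 * i) := by
    apply eq_addr
    u_omega
  have hcb0 : s_1166bf.mem.readLE (addr g.f + (UInt64.ofNat i + 108) * 8 + 8) 8 = (v.reg .rax).toNat := by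
    rw [w_mem_1166bf]
    u_read
  have hcbs : stb_vorbis.channel_buffers s_1166bf.mem g.f i = (v.reg .rax).toNat := by
    simp only [vacc, voff]
    unfold Mem.u64
    rw [← ea]
    exact hcb0
  have hsame := w_same
  simp only [X86.User.Spec.footprint, vspec] at hsame
  have hcodeOK : CodeOK u₀ s_1166bfr.mem := Vorbis.conv_code_eqOn w_code
  have hrbp : s_1166bfr.reg .rbp = addr g.f := by
    rw [w_kept.get .rbp rfl]
    exact c_rbp
  obtain ⟨A', hpt', ht', hext, hres, hef, _⟩ :=
    alloc_step hfr hh hp hf1 hm1 ht1 hi16 hsp hrdi hsame w_post w_rip w_rsp hcodeOK w_inv hrbp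
  rw [hn] at hres
  have hcbr : stb_vorbis.channel_buffers s_1166bfr.mem g.f i = (v.reg .rax).toNat := by
    rw [← hcbs]
    simp only [vacc, voff]
    exact hef.u64 _ (by omega) (by omega) (by omega)
  refine ReachVia.done ⟨A', hpt', ?_, w_rbx, w_r12, w_r13, ht', ?_, hb1le, ?_, hres⟩
  · rw [w_kept.get .r14 rfl]
    exact hb.r14
  · rw [← hb1s]
    simp only [vacc, voff]
    exact hef.i32 _ (by omega) (by omega) (by omega)
  · rw [hcbr]
    rcases hb.res with h0 | hS
    · left
      rw [h0]
      rfl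
    · right
      exact hS.mono hext

/-- `lea esi, [rax + rax]` on `eax = longest_floorlist ≤ 250`: the request of the third allocation is `2·LF`. -/
theorem lea2 (b : Nat) (hb : b ≤ 250) :
    (Word.ofBV (BitVec.setWidth 32 (Word.ofBV (BitVec.ofNat 32 b) + Word.ofBV (BitVec.ofNat 32 b)).toBitVec)).toNat = 2 * b := by
  rw [Vorbis.toNat_ofBV32, BitVec.toNat_setWidth, UInt64.toNat_toBitVec, UInt64.toNat_add, Vorbis.toNat_ofBV32,
    BitVec.toNat_ofNat]
  omega

/-- **At `cut322` (0x1166f6, the return of the third `setup_malloc`)**: as `CutB`, with `previous_window[i]` stored too (NULL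
or a block of `2·b1` bytes since `A9`); rax = NULL or a block of `2·longest_floorlist` bytes allocated since `A9`. -/
structure CutC (u₀ : State) (g : Ghost) (i b1 : Nat) (A9 : Arena) (A : Arena × List Obj) (s : State) : Prop where
  pt : SecPt u₀ g Vorbis.L.start_decoder.cut322 9 9 10 A9 A s
  r14 : s.reg .r14 = addr i
  rbx : s.reg .rbx = UInt64.ofNat i
  r12 : s.reg .r12 = UInt64.ofNat i + 108
  r13 : s.reg .r13 = addr g.f + UInt64.ofNat i * 8 + 872
  tr : Tr g i i (Since A9 A.1) s.mem
  bs : stb_vorbis.blocksize_1 s.mem g.f = (b1 : Int)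
  bs_le : b1 ≤ 8192
  cb : stb_vorbis.channel_buffers s.mem g.f i = 0 ∨ Since A9 A.1 ⟨stb_vorbis.channel_buffers s.mem g.f i, 4 * b1⟩
  pw : stb_vorbis.previous_window s.mem g.f i = 0 ∨ Since A9 A.1 ⟨stb_vorbis.previous_window s.mem g.f i, 2 * b1⟩
  res : s.reg .rax = 0 ∨ Since A9 A.1 ⟨(s.reg .rax).toNat, 2 * (s.mem.i32 (g.R + 0x28)).toNat⟩

/-- **R16, piece 3** (`cut321` 0x1166c4 … 0x1166f1, returns into `cut322`): the spill of the second result, the checked store of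
`previous_window[i]`, the load of `longest_floorlist` from `[rsp + 28H]`, `setup_malloc(f, 2·LF)`. -/
theorem seg3 {Lay : Layout} (hLay : Lay.hi = 0x1000000) {μ : Microarch} (hμ : UserX.MicroOK μ) {u₀ : State}
    (hcode : HasCodeNat Lay u₀ Vorbis.L.start_decoder.entry Vorbis.Code.code_start_decoder.nat Vorbis.L.start_decoder.size)
    (hstore8 : Asan.SmallCheck Lay μ Vorbis.WayInv (Vorbis.CodeOK u₀) [.rax, .rcx, .rdx] 8 Vorbis.L.__asan_store8_noabort.entry)
    (h_setup_malloc : ∀ (others : List Obj) (frames : List (Nat × FrameLayout)) (A : Arena),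
      Calls Lay μ Vorbis.WayInv (Vorbis.conv u₀) Vorbis.L.setup_malloc.entry (Vorbis.Spec.setup_malloc.spec others frames A))
    {g : Ghost} {i b1 : Nat} {v : State} {A9 : Arena} {A : Arena × List Obj} (hb : CutB u₀ g i b1 A9 A v) :
    ReachVia Lay μ WayInv v (fun w => ∃ A', CutC u₀ g i b1 A9 A' w) := by
  have hpt := hb.pt
  have hfr := hpt.frame
  have hh := hpt.hand
  have hm := hpt.mid
  have hp : Pos g A := hpt.pos
  have he := hfr.entry
  v_entry he
  obtain ⟨hRa, hR8⟩ := hfr.r_eq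
  simp only [steady, Ghost.RA] at hRa
  simp only [depth] at he_room he_stack
  have hflo := hp.f_lo
  have hf2 := hp.f_hi
  have hf3 := hp.f_stack
  simp only [Ghost.RA] at hf3
  have hRn : (addr g.R).toNat = g.R := toNat_addr _ (by omega)
  have hfn : (addr g.f).toNat = g.f := toNat_addr _ (by omega)
  have w_rip := hfr.rip
  have c_rsp := hfr.rsp
  have c_rbp := hpt.rbp
  have c_rbx := hb.rbx
  have w_eq : Mem.EqOn Vorbis.L.textLo Vorbis.L.textHi u₀.mem v.mem := hfr.code
  have hdf : v.flags .df = false := (show abiInv _ from hfr.inv).1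
  have hmx : v.mxcsr &&& 0x1F80 = 0x1F80 := (show abiInv _ from hfr.inv).2
  have hsse := Vorbis.sseOK_of_abiInv hfr.inv
  have hsm := h_setup_malloc A.2 g.frames' A.1
  have hd1 := hm.header.HD1
  have hlt := hb.tr.lt
  have hi16 : i < 16 := by omega
  have hb1le := hb.bs_le
  -- `longest_floorlist` as a number, and as the four bytes the load at 0x1166e7 reads
  have hlfl := hm.lfl (by decide) (by decide)
  obtain ⟨LF, hLF⟩ : ∃ LF : Nat, v.mem.i32 (g.R + 0x28) = (LF : Int) :=
    ⟨(v.mem.i32 (g.R + 0x28)).toNat, by have := hlfl.lo; omega⟩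
  have hLFle : LF ≤ 250 := by
    have := hlfl.hi
    omega
  have hLFr : v.mem.readLE (addr g.R + 40) 4 = LF := by
    rw [addr_add_lit]
    exact i32_read hLF
  u_walk hcode [hμ.vendor] until [Vorbis.L.start_decoder.cut322] span [Vorbis.L.textLo, Vorbis.L.textHi] side (v_side)
  case check_1166d8 =>
    -- 0x1166d8: the store of `f->previous_window[i]` (f + 1128 + 8i)
    have hun : ShadowUntouched v.mem s_1166d8.mem := by v_untouched
    refine (hh.obj.mono (frames'_sub g A.2)).accSmall hfr.shadow hun _ 8 (by decide) (by u_omega) ?_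
    simp only [Off.sizeof.stb_vorbis]
    u_omega
  case call_inv => v_inv
  case pre_1166f1 =>
    -- 0x1166f1: `setup_malloc(f, 2·LF)`
    have hun : ShadowUntouched v.mem s_1166f1.mem := by v_untouched
    have hs : Mem.SameExcept [⟨g.R - 8, g.R⟩, ⟨g.R + 16, g.R + 24⟩, ⟨g.f + 1128 + 8 * i, g.f + 1136 + 8 * i⟩]
        v.mem s_1166f1.mem := by u_same
    refine ⟨shadowPre_call hfr (by rw [w_rsp]; u_omega) hun, ?_, ?_, hh.arenaText⟩
    · rw [w_rdi, hfn]
      exact (hh.obj.mono (frames'_sub g A.2)).blockLive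
    · rw [w_rdi, hfn]
      apply hm.arena.frame (by simp only [Off.sizeof.stb_vorbis]; omega)
      apply hs.eqOn
      intro w hw
      simp only [List.mem_cons, List.mem_nil_iff, or_false] at hw
      rcases hw with rfl | rfl | rfl <;> simp only [voff] <;> omega
  -- the returned state (0x1166f6)
  have hsp : (s_1166f1.reg .rsp).toNat + 8 = g.R := by
    rw [w_rsp_1166f1]
    u_omega
  have hrdi : (s_1166f1.reg .rdi).toNat = g.f := by
    rw [w_rdi_1166f1]
    exact hfn
  have hn : (s_1166f1.reg .rsi).toNat % 2 ^ 32 = 2 * LF := by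
    rw [w_rsi_1166f1, lea2 LF hLFle]
    omega
  have hun0 : ShadowUntouched v.mem s_1166f1.mem := by v_untouched
  have hs0 : Mem.SameExcept [⟨g.R - 8, g.R⟩, ⟨g.R + 16, g.R + 24⟩, ⟨g.f + 1128 + 8 * i, g.f + 1136 + 8 * i⟩]
      v.mem s_1166f1.mem := by u_same
  have hws0 : ∀ w, w ∈ [(⟨g.R - 8, g.R⟩ : Span), ⟨g.R + 16, g.R + 24⟩, ⟨g.f + 1128 + 8 * i, g.f + 1136 + 8 * i⟩] →
      OwnWin g i A9 A w := by
    intro w hw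
    simp only [List.mem_cons, List.mem_nil_iff, or_false] at hw
    unfold OwnWin
    rcases hw with rfl | rfl | rfl
    · left
      simp only []
      omega
    · right; left
      simp only []
      omega
    · right; right; right; right; left
      simp only []
      omega
  obtain ⟨hf1, hm1, ht1⟩ := own_step hp (FInv.of hfr) hm hb.tr hi16 hs0 hun0 hws0
  -- what the own stores leave alone: `blocksize_1`, `channel_buffers[i]`, the slot of `longest_floorlist`
  have e0 : Mem.EqOn (g.f + 156) (g.f + 160) v.mem s_1166f1.mem := by
    apply hs0.eqOn
    intro w hw
    simp only [List.mem_cons, List.mem_nil_iff, or_false] at hw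
    rcases hw with rfl | rfl | rfl <;> simp only [] <;> omega
  have e1 : Mem.EqOn (g.f + 872 + 8 * i) (g.f + 880 + 8 * i) v.mem s_1166f1.mem := by
    apply hs0.eqOn
    intro w hw
    simp only [List.mem_cons, List.mem_nil_iff, or_false] at hw
    rcases hw with rfl | rfl | rfl <;> simp only [] <;> omega
  have e2 : Mem.EqOn (g.R + 0x28) (g.R + 0x2c) v.mem s_1166f1.mem := by
    apply hs0.eqOn
    intro w hw
    simp only [List.mem_cons, List.mem_nil_iff, or_false] at hw
    rcases hw with rfl | rfl | rfl <;> simp only [] <;> omega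
  -- `previous_window[i]` at the call state: the spilled result
  have ea : addr g.f + (UInt64.ofNat i + 140) * 8 + 8 = addr (g.f + 1128 + 8 * i) := by
    apply eq_addr
    u_omega
  have hpw0 : s_1166f1.mem.readLE (addr g.f + (UInt64.ofNat i + 140) * 8 + 8) 8 = (v.reg .rax).toNat := by
    rw [w_mem_1166f1]
    u_read
  have hpws : stb_vorbis.previous_window s_1166f1.mem g.f i = (v.reg .rax).toNat := by
    simp only [vacc, voff]
    unfold Mem.u64
    rw [← ea]
    exact hpw0
  have hsame := w_same
  simp only [X86.User.Spec.footprint, vspec] at hsame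
  have hcodeOK : CodeOK u₀ s_1166f1r.mem := Vorbis.conv_code_eqOn w_code
  have hrbp : s_1166f1r.reg .rbp = addr g.f := by
    rw [w_kept.get .rbp rfl]
    exact c_rbp
  obtain ⟨A', hpt', ht', hext, hres, hef, hefr⟩ :=
    alloc_step hfr hh hp hf1 hm1 ht1 hi16 hsp hrdi hsame w_post w_rip w_rsp hcodeOK w_inv hrbp
  rw [hn] at hres
  have hpwr : stb_vorbis.previous_window s_1166f1r.mem g.f i = (v.reg .rax).toNat := by
    rw [← hpws]
    simp only [vacc, voff]
    exact hef.u64 _ (by omega) (by omega) (by omega)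
  have hcbr : stb_vorbis.channel_buffers s_1166f1r.mem g.f i = stb_vorbis.channel_buffers v.mem g.f i := by
    simp only [vacc, voff]
    rw [hef.u64 _ (by omega) (by omega) (by omega)]
    exact e1.u64 _ (by omega) (by omega) (by omega)
  have hLFr' : s_1166f1r.mem.i32 (g.R + 0x28) = (LF : Int) := by
    rw [← hLF, hefr.i32 _ (by omega) (by omega) (by omega)]
    exact e2.i32 _ (by omega) (by omega) (by omega)
  refine ReachVia.done ⟨A', hpt', ?_, ?_, ?_, ?_, ht', ?_, hb1le, ?_, ?_, ?_⟩
  · rw [w_kept.get .r14 rfl]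
    exact hb.r14
  · rw [w_kept.get .rbx rfl]
    exact hb.rbx
  · rw [w_kept.get .r12 rfl]
    exact hb.r12
  · rw [w_kept.get .r13 rfl]
    exact hb.r13
  · rw [← hb.bs]
    simp only [vacc, voff]
    rw [hef.i32 _ (by omega) (by omega) (by omega)]
    exact e0.i32 _ (by omega) (by omega) (by omega)
  · rw [hcbr]
    rcases hb.cb with h0 | hS
    · exact Or.inl h0
    · exact Or.inr (hS.mono hext)
  · rw [hpwr]
    rcases hb.res with h0 | hS
    · left
      rw [h0]
      rfl
    · right
      exact hS.mono hext
  · rw [hLFr']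
    exact hres

/-- **At `cut323` (0x116752, the return of `error(f, VORBIS_outofmem)`)**: the point, eax = 0. -/
structure CutE (u₀ : State) (g : Ghost) (A9 : Arena) (A : Arena × List Obj) (s : State) : Prop where
  pt : SecPt u₀ g Vorbis.L.start_decoder.cut323 9 9 10 A9 A s
  rax : s.reg .rax = 0

/-- **At `cut324` (0x11677b, the return of `memset`)**: the point, `r14d = i`, and the transient with channel `i` done. -/
structure CutD (u₀ : State) (g : Ghost) (i : Nat) (A9 : Arena) (A : Arena × List Obj) (s : State) : Prop where
  pt : SecPt u₀ g Vorbis.L.start_decoder.cut324 9 9 10 A9 A s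
  r14 : s.reg .r14 = addr i
  tr : Tr g i (i + 1) (Since A9 A.1) s.mem

/-- **The return of `error` in piece 4**, from the two footprints: the own stores up to the call (`finalY[i]`, pushed return
addresses) and `error`'s (`f->error`, its frame). -/
theorem err_ret {u₀ : State} {g : Ghost} {i b1 : Nat} {A9 : Arena} {A : Arena × List Obj} {v s sr : State}
    (hb : CutC u₀ g i b1 A9 A v)
    (hs0 : Mem.SameExcept [⟨g.R - 8, g.R⟩, ⟨g.f + 1264 + 8 * i, g.f + 1272 + 8 * i⟩] v.mem s.mem)
    (hun0 : ShadowUntouched v.mem s.mem)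
    (hsB : Mem.SameExcept [⟨g.R - 8 - 48, g.R - 8⟩, ⟨g.f + 140, g.f + 140 + 4⟩] s.mem sr.mem)
    (hunB : ShadowUntouched s.mem sr.mem)
    (hrip : sr.rip = Vorbis.L.start_decoder.cut323) (hrsp : sr.reg .rsp = addr g.R) (hcode : CodeOK u₀ sr.mem)
    (hinv : abiInv sr) (hrbp : sr.reg .rbp = addr g.f) (hrax : sr.reg .rax = 0) : CutE u₀ g A9 A sr := by
  have hpt := hb.pt
  have hfr := hpt.frame
  have hm := hpt.mid
  have hp : Pos g A := hpt.pos
  have hd1 := hm.header.HD1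
  have hlt := hb.tr.lt
  have hi16 : i < 16 := by omega
  have p1 := hp.r_eq
  have p2 := hp.ra_lo
  have hwsA : ∀ w, w ∈ [(⟨g.R - 8, g.R⟩ : Span), ⟨g.f + 1264 + 8 * i, g.f + 1272 + 8 * i⟩] → OwnWin g i A9 A w := by
    intro w hw
    simp only [List.mem_cons, List.mem_nil_iff, or_false] at hw
    unfold OwnWin
    rcases hw with rfl | rfl
    · left
      simp only []
      omega
    · right; right; right; right; right; left
      simp only []
      omega
  obtain ⟨hfA, hmA, htA⟩ := own_step hp (FInv.of hfr) hm hb.tr hi16 hs0 hun0 hwsA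
  have hwsB : ∀ w, w ∈ [(⟨g.R - 8 - 48, g.R - 8⟩ : Span), ⟨g.f + 140, g.f + 140 + 4⟩] → OwnWin g i A9 A w := by
    intro w hw
    simp only [List.mem_cons, List.mem_nil_iff, or_false] at hw
    unfold OwnWin
    rcases hw with rfl | rfl
    · left
      simp only []
      omega
    · right; right; left
      simp only []
      omega
  obtain ⟨hfB, hmB, _⟩ := own_step hp hfA hmA htA hi16 hsB hunB hwsB
  exact ⟨⟨hfB.frame hfr hrip hrsp hcode hinv hfr.offText hfr.ext, hpt.hand, hmB, hrbp⟩, hrax⟩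

/-- **The return of `memset` in piece 4** (the three results are non-NULL): from the own stores up to the call and memset's
footprint (its frame, the new block `channel_buffers[i]`, a young window) the point at `cut324`, and the transient with
channel `i` done (`ChanUpTo.step`, `FYUpTo.step`). -/
theorem memset_ret {u₀ : State} {g : Ghost} {i b1 : Nat} {A9 : Arena} {A : Arena × List Obj} {v s sr : State}
    (hb : CutC u₀ g i b1 A9 A v)
    (hs0 : Mem.SameExcept [⟨g.R - 8, g.R⟩, ⟨g.f + 1264 + 8 * i, g.f + 1272 + 8 * i⟩] v.mem s.mem)
    (hun0 : ShadowUntouched v.mem s.mem)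
    (hfy0 : stb_vorbis.finalY s.mem g.f i = (v.reg .rax).toNat)
    (hp1 : stb_vorbis.channel_buffers v.mem g.f i ≠ 0) (hp2 : stb_vorbis.previous_window v.mem g.f i ≠ 0)
    (hp3 : v.reg .rax ≠ 0)
    (hsB : Mem.SameExcept [⟨g.R - 8 - 64, g.R - 8⟩,
      ⟨stb_vorbis.channel_buffers v.mem g.f i, stb_vorbis.channel_buffers v.mem g.f i + 4 * b1⟩] s.mem sr.mem)
    (hunB : ShadowUntouched s.mem sr.mem)
    (hrip : sr.rip = Vorbis.L.start_decoder.cut324) (hrsp : sr.reg .rsp = addr g.R) (hcode : CodeOK u₀ sr.mem)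
    (hinv : abiInv sr) (hrbp : sr.reg .rbp = addr g.f) (hr14 : sr.reg .r14 = addr i) : CutD u₀ g i A9 A sr := by
  have hpt := hb.pt
  have hfr := hpt.frame
  have hm := hpt.mid
  have hp : Pos g A := hpt.pos
  have hd1 := hm.header.HD1
  have hlt := hb.tr.lt
  have hi16 : i < 16 := by omega
  have p1 := hp.r_eq
  have p2 := hp.ra_lo
  have p3 := hp.ra_hi
  have p4 := hp.f_lo
  have p5 := hp.f_hi
  have p6 := hp.f_stack
  have p7 := hp.objOut
  have p11 := hp.ar_stack
  have hS1 : Since A9 A.1 ⟨stb_vorbis.channel_buffers v.mem g.f i, 4 * b1⟩ := hb.cb.resolve_left hp1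
  have hS2 : Since A9 A.1 ⟨stb_vorbis.previous_window v.mem g.f i, 2 * b1⟩ := hb.pw.resolve_left hp2
  have hS3 : Since A9 A.1 ⟨(v.reg .rax).toNat, 2 * (v.mem.i32 (g.R + 0x28)).toNat⟩ := hb.res.resolve_left hp3
  have hin := arena_inside hm.arena hS1.1
  simp only [] at hin
  have hwsA : ∀ w, w ∈ [(⟨g.R - 8, g.R⟩ : Span), ⟨g.f + 1264 + 8 * i, g.f + 1272 + 8 * i⟩] → OwnWin g i A9 A w := by
    intro w hw
    simp only [List.mem_cons, List.mem_nil_iff, or_false] at hw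
    unfold OwnWin
    rcases hw with rfl | rfl
    · left
      simp only []
      omega
    · right; right; right; right; right; left
      simp only []
      omega
  obtain ⟨hfA, hmA, htA⟩ := own_step hp (FInv.of hfr) hm hb.tr hi16 hs0 hun0 hwsA
  have hwsB : ∀ w, w ∈ [(⟨g.R - 8 - 64, g.R - 8⟩ : Span),
      ⟨stb_vorbis.channel_buffers v.mem g.f i, stb_vorbis.channel_buffers v.mem g.f i + 4 * b1⟩] →
      OwnWin g i A9 A w := by
    intro w hw
    simp only [List.mem_cons, List.mem_nil_iff, or_false] at hw
    unfold OwnWin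
    rcases hw with rfl | rfl
    · left
      simp only []
      omega
    · right; right; right; right; right; right
      exact Young.of_since hmA.arena hm.extc hS1 ⟨Nat.le_refl _, Nat.le_refl _⟩
  obtain ⟨hfB, hmB, htB⟩ := own_step hp hfA hmA htA hi16 hsB hunB hwsB
  -- what the two steps leave alone
  have eAf : ∀ lo hi, g.f ≤ lo → hi ≤ g.f + 1264 + 8 * i → Mem.EqOn lo hi v.mem s.mem := by
    intro lo hi h1 h2
    apply hs0.eqOn
    intro w hw
    simp only [List.mem_cons, List.mem_nil_iff, or_false] at hw
    rcases hw with rfl | rfl <;> simp only [] <;> omega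
  have eAr : Mem.EqOn (g.R + 0x28) (g.R + 0x2c) v.mem s.mem := by
    apply hs0.eqOn
    intro w hw
    simp only [List.mem_cons, List.mem_nil_iff, or_false] at hw
    rcases hw with rfl | rfl <;> simp only [] <;> omega
  have eBf : Mem.EqOn g.f (g.f + 1808) s.mem sr.mem := by
    apply hsB.eqOn
    intro w hw
    simp only [List.mem_cons, List.mem_nil_iff, or_false] at hw
    rcases hw with rfl | rfl <;> simp only [] <;> omega
  have eBr : Mem.EqOn (g.R + 0x28) (g.R + 0x2c) s.mem sr.mem := by
    apply hsB.eqOn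
    intro w hw
    simp only [List.mem_cons, List.mem_nil_iff, or_false] at hw
    rcases hw with rfl | rfl <;> simp only [] <;> omega
  have hcb : stb_vorbis.channel_buffers sr.mem g.f i = stb_vorbis.channel_buffers v.mem g.f i := by
    simp only [vacc, voff]
    rw [eBf.u64 _ (by omega) (by omega) (by omega)]
    exact (eAf (g.f + 872 + 8 * i) (g.f + 880 + 8 * i) (by omega) (by omega)).u64 _ (by omega) (by omega) (by omega)
  have hpw : stb_vorbis.previous_window sr.mem g.f i = stb_vorbis.previous_window v.mem g.f i := by
    simp only [vacc, voff]
    rw [eBf.u64 _ (by omega) (by omega) (by omega)]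
    exact (eAf (g.f + 1128 + 8 * i) (g.f + 1136 + 8 * i) (by omega) (by omega)).u64 _ (by omega) (by omega) (by omega)
  have hfy : stb_vorbis.finalY sr.mem g.f i = (v.reg .rax).toNat := by
    rw [← hfy0]
    simp only [vacc, voff]
    exact eBf.u64 _ (by omega) (by omega) (by omega)
  have hbs : stb_vorbis.blocksize_1 sr.mem g.f = (b1 : Int) := by
    rw [← hb.bs]
    simp only [vacc, voff]
    rw [eBf.i32 _ (by omega) (by omega) (by omega)]
    exact (eAf (g.f + 156) (g.f + 160) (by omega) (by omega)).i32 _ (by omega) (by omega) (by omega)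
  have hlf : sr.mem.i32 (g.R + 0x28) = v.mem.i32 (g.R + 0x28) := by
    rw [eBr.i32 _ (by omega) (by omega) (by omega)]
    exact eAr.i32 _ (by omega) (by omega) (by omega)
  have hbsz : bsize sr.mem g.f 1 = b1 := by
    rw [bsize_one, hbs]
    omega
  refine ⟨⟨hfB.frame hfr hrip hrsp hcode hinv hfr.offText hfr.ext, hpt.hand, hmB, hrbp⟩, hr14, ?_⟩
  refine ⟨htB.lt, htB.prev0, ?_, ?_⟩
  · refine htB.chan.step (fun _ _ => rfl) (fun _ _ => rfl) rfl (fun _ hB => hB) ⟨?_, ?_⟩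
    · rw [hcb, hbsz]
      exact hS1
    · rw [hpw, hbsz]
      exact hS2
  · apply htB.fy.step
    rw [hfy, hlf]
    exact hS3

/-- A block allocated since `A9` is ONE live object (AR6): memset's precondition. -/
theorem liveIn_of_since {g : Ghost} {k kc z : Nat} {A9 : Arena} {A : Arena × List Obj} {m : Mem} {p n : Nat}
    (hm : Mid g k kc z A9 A m) (hS : Since A9 A.1 ⟨p, n⟩) : LiveIn A.2 g.frames' p n := by
  have hblk : A.1.Block p n := hS.1
  exact ⟨⟨p, n, .setup⟩, List.mem_append_right _ (hm.arena.AR6 _ hblk.obj_mem), Nat.le_refl _, Nat.le_refl _⟩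


end Vorbis.Spec.start_decoder_R16
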